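-- pv_equiv track=rewrite | github.com/DonghyuckLeeKr/dart_sec | dart_sector_analyzer/analysis.py | _fieldnames
-- ===== SOURCE A (Python) =====
-- from typing import Any
--
-- def _fieldnames(rows: list[dict[str, Any]]) -> list[str]:
--     preferred = [
--         "corp_code",
--         "corp_name",
--         "stock_code",
--         "bsns_year",
--         "reprt_code",
--         "report_key",
--         "report_label",
--         "fs_div",
--         "collection_status",
--         "failure_reason",
--         "data_source",
--         "rank_operating_income",
--         "operating_revenue",
--         "operating_revenue_estimate",
--         "operating_income",
--         "operating_income_yoy",
--         "pretax_income",
--         "pretax_income_yoy",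
--         "net_income",
--         "net_income_yoy",
--         "assets",
--         "liabilities",
--         "equity",
--         "operating_margin",
--         "operating_margin_estimate",
--         "net_margin",
--         "roe",
--         "debt_ratio",
--         "rcept_no",
--         "currency",
--         "pretax_income_basis",
--         "pretax_income_account",
--         "operating_revenue_estimate_basis",
--         "operating_revenue_estimate_account",
--     ]
--     seen = set(preferred)
--     rest: list[str] = []
--     for row in rows:
--         for key in row:
--             if key not in seen:
--                 rest.append(key)
--                 seen.add(key)
--     return [key for key in preferred if any(key in row for row in rows)] + rest
-- ===== SOURCE B (Python) =====
-- from typing import Any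
--
-- def _fieldnames(rows: list[dict[str, Any]]) -> list[str]:
--     preferred = [
--         "corp_code",
--         "corp_name",
--         "stock_code",
--         "bsns_year",
--         "reprt_code",
--         "report_key",
--         "report_label",
--         "fs_div",
--         "collection_status",
--         "failure_reason",
--         "data_source",
--         "rank_operating_income",
--         "operating_revenue",
--         "operating_revenue_estimate",
--         "operating_income",
--         "operating_income_yoy",
--         "pretax_income",
--         "pretax_income_yoy",
--         "net_income",
--         "net_income_yoy",
--         "assets",
--         "liabilities",
--         "equity",
--         "operating_margin",
--         "operating_margin_estimate",
--         "net_margin",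
--         "roe",
--         "debt_ratio",
--         "rcept_no",
--         "currency",
--         "pretax_income_basis",
--         "pretax_income_account",
--         "operating_revenue_estimate_basis",
--         "operating_revenue_estimate_account",
--     ]
--     # One ordered index of every key seen in any row (first-seen order), built once.
--     all_keys = dict.fromkeys(k for row in rows for k in row)
--     preferred_set = set(preferred)
--     return [k for k in preferred if k in all_keys] + [k for k in all_keys if k not in preferred_set]
-- ===== Notes on version B (the rewrite author's own statement) =====
-- stated objective: alternative
-- what changed: B builds one ordered first-seen index of all row keys (dict.fromkeys) and partitions it against a preferred set in two filtering passes, instead of A's per-preferred-key rescans of all rows plus an incremental seen/rest accumulation loop.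
import Mathlib
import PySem

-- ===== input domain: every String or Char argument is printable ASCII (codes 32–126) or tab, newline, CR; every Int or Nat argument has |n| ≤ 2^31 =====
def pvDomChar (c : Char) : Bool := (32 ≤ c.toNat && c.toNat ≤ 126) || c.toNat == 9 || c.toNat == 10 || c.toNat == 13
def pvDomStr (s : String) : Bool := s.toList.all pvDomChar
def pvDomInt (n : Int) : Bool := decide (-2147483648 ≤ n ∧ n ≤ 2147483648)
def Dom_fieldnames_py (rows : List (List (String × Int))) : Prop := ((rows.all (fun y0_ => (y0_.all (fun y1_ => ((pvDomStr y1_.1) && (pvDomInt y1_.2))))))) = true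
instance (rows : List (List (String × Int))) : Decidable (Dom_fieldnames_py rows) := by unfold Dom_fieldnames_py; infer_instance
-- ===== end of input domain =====

-- B replaces A's per-preferred-key rescans of the rows and its incremental seen/rest loop with one
-- ordered first-seen key index that is then partitioned against the preferred set (alternative decomposition).

-- the function's literal preferred column order (shared constant of both ports)
def pvPreferred : List String :=
  ["corp_code", "corp_name", "stock_code", "bsns_year", "reprt_code", "report_key",
   "report_label", "fs_div", "collection_status", "failure_reason", "data_source",
   "rank_operating_income", "operating_revenue", "operating_revenue_estimate",
   "operating_income", "operating_income_yoy", "pretax_income", "pretax_income_yoy",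
   "net_income", "net_income_yoy", "assets", "liabilities", "equity", "operating_margin",
   "operating_margin_estimate", "net_margin", "roe", "debt_ratio", "rcept_no", "currency",
   "pretax_income_basis", "pretax_income_account", "operating_revenue_estimate_basis",
   "operating_revenue_estimate_account"]

-- ===== PORT A =====
-- literal transliteration of A: seen = set(preferred); nested loop over rows and over each row's
-- keys (a dict iterates its keys: map Prod.fst) growing rest; then a preferred-filter that rescans
-- the rows with any(key in row for row in rows) ('key in row' on a dict = key among its keys).
def fieldnames_py (rows : List (List (String × Int))) : List String :=
  let preferred := pvPreferred
  let seen : PySem.Set String := PySem.Set.ofList preferred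
  let sr : PySem.Set String × List String :=
    rows.foldl (fun st row =>
      (row.map Prod.fst).foldl (fun st key =>
        if PySem.Set.contains st.1 key then st
        else (PySem.Set.add st.1 key, st.2 ++ [key])) st)
      (seen, ([] : List String))
  preferred.filter (fun key => rows.any (fun row => row.any (fun p => p.1 == key))) ++ sr.2

-- ===== PORT B =====
-- literal transliteration of B: all_keys = dict.fromkeys(k for row in rows for k in row)
-- (ordered first-seen dedup = PySem.List.dedup), preferred_set = set(preferred), then two filters.
def fieldnames_py_alt (rows : List (List (String × Int))) : List String :=
  let allKeys : List String := PySem.List.dedup (rows.flatMap (fun row => row.map Prod.fst))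
  let preferredSet : PySem.Set String := PySem.Set.ofList pvPreferred
  pvPreferred.filter (fun k => allKeys.contains k)
    ++ allKeys.filter (fun k => !(PySem.Set.contains preferredSet k))

-- ===== PRECONDITION & SPEC =====
def Spec_fieldnames_py (rows : List (List (String × Int))) (out : List String) : Prop := out = fieldnames_py_alt rows
instance (rows : List (List (String × Int))) (out : List String) : Decidable (Spec_fieldnames_py rows out) := by unfold Spec_fieldnames_py; infer_instance

-- ===== CLAIM (what is proved, stated in full; the proofs are below) =====
def Claim_equal_fieldnames_py : Prop := ∀ (rows : List (List (String × Int))), Dom_fieldnames_py rows → Spec_fieldnames_py rows (fieldnames_py rows)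

-- ===== LEMMAS AND PROOFS =====

-- first-seen keys of `keys` that are fresh w.r.t. the seen-list `s`, in order
def pvFresh (s : List String) : List String → List String
  | [] => []
  | k :: ks => if s.contains k then pvFresh s ks else k :: pvFresh (s ++ [k]) ks

theorem pvSetContains (s : PySem.Set String) (x : String) :
    PySem.Set.contains s x = List.contains s x := rfl

theorem pvSetAdd (s : PySem.Set String) (x : String) :
    PySem.Set.add s x = if List.contains s x then s else s ++ [x] := rfl

-- A's loop: the rest accumulator collects exactly the fresh first-seen keys
theorem pvFold_rest (keys : List String) (s : PySem.Set String) (r : List String) :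
    (keys.foldl (fun st key =>
        if PySem.Set.contains st.1 key then st
        else (PySem.Set.add st.1 key, st.2 ++ [key])) (s, r)).2
      = r ++ pvFresh s keys := by
  induction keys generalizing s r with
  | nil => simp [pvFresh]
  | cons k ks ih =>
    rw [List.foldl_cons]
    show (List.foldl _ (if PySem.Set.contains s k then (s, r)
        else (PySem.Set.add s k, r ++ [k])) ks).2 = _
    rw [pvSetContains, pvSetAdd, pvFresh]
    by_cases h : List.contains s k = true
    · rw [if_pos h, if_pos h, ih]
    · rw [if_neg h, if_neg h, if_neg h, ih]
      simp

-- Set.ofList's fold splits as the seed followed by the fresh keys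
theorem pvFold_add (keys : List String) (u : List String) :
    keys.foldl PySem.Set.add u = u ++ pvFresh u keys := by
  induction keys generalizing u with
  | nil => simp [pvFresh]
  | cons k ks ih =>
    rw [List.foldl_cons, pvSetAdd, pvFresh]
    by_cases h : List.contains u k = true
    · rw [if_pos h, if_pos h, ih]
    · rw [if_neg h, if_neg h, ih]
      simp

-- filtering the fresh keys of seed u by "not in p" = fresh keys of a seed w whose membership is u ∪ p
theorem pvFresh_filter (keys : List String) (p u w : List String)
    (h : ∀ x, w.contains x = (u.contains x || p.contains x)) :
    (pvFresh u keys).filter (fun k => !(p.contains k)) = pvFresh w keys := by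
  induction keys generalizing u w with
  | nil => simp [pvFresh]
  | cons k ks ih =>
    rw [pvFresh, pvFresh]
    by_cases hu : List.contains u k = true
    · have hw : List.contains w k = true := by rw [h k, hu, Bool.true_or]
      rw [if_pos hu, if_pos hw]
      exact ih u w h
    · by_cases hp : List.contains p k = true
      · have hw : List.contains w k = true := by rw [h k, hp, Bool.or_true]
        rw [if_neg hu, if_pos hw, List.filter_cons_of_neg (by simpa using hp)]
        refine ih (u ++ [k]) w ?_
        intro x
        rw [h x, List.contains_append]
        by_cases hx : List.contains [k] x = true
        · have hxk : x = k := by simpa using hx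
          subst hxk
          rw [hp]
          simp only [Bool.or_true]
        · rw [Bool.not_eq_true] at hx
          rw [hx, Bool.or_false]
      · have hw : ¬ List.contains w k = true := by
          rw [h k]
          simp only [Bool.or_eq_true, not_or]
          exact ⟨hu, hp⟩
        rw [if_neg hu, if_neg hw, List.filter_cons_of_pos (by simpa using hp)]
        rw [ih (u ++ [k]) (w ++ [k]) ?_]
        intro x
        rw [List.contains_append, List.contains_append, h x]
        cases List.contains [k] x <;> cases List.contains u x <;> cases List.contains p x <;> rfl

-- the preferred-column tests agree: "key appears in some row" = "key in the deduped index"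
theorem pvAny_eq_contains (rows : List (List (String × Int))) (key : String) :
    rows.any (fun row => row.any (fun p => p.1 == key))
      = (PySem.List.dedup (rows.flatMap (fun row => row.map Prod.fst))).contains key := by
  rw [Bool.eq_iff_iff]
  simp only [List.any_eq_true, List.contains_iff_mem, PySem.List.dedup, PySem.Set.mem_ofList,
    List.mem_flatMap, List.mem_map, beq_iff_eq]

-- ===== VERDICT (by name: the statement is the Claim_ definition above) =====
theorem fieldnames_py_spec : Claim_equal_fieldnames_py := by
  intro rows _
  show fieldnames_py rows = fieldnames_py_alt rows
  show List.filter (fun key => rows.any fun row => row.any fun p => p.1 == key) pvPreferred ++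
      (List.foldl (fun st row => List.foldl (fun st key =>
          if PySem.Set.contains st.1 key then st
          else (PySem.Set.add st.1 key, st.2 ++ [key])) st (List.map Prod.fst row))
        (PySem.Set.ofList pvPreferred, ([] : List String)) rows).2
    = List.filter (fun k =>
          (PySem.List.dedup (rows.flatMap (fun row => row.map Prod.fst))).contains k) pvPreferred ++
      List.filter (fun k => !(PySem.Set.contains (PySem.Set.ofList pvPreferred) k))
        (PySem.List.dedup (rows.flatMap (fun row => row.map Prod.fst)))
  congr 1
  · exact List.filter_congr (fun k _ => pvAny_eq_contains rows k)
  · rw [← List.foldl_flatMap, pvFold_rest, List.nil_append]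
    have hded : PySem.List.dedup (rows.flatMap (fun row => row.map Prod.fst))
        = pvFresh [] (rows.flatMap (fun row => row.map Prod.fst)) := by
      rw [show PySem.List.dedup (rows.flatMap (fun row => row.map Prod.fst))
            = (rows.flatMap (fun row => row.map Prod.fst)).foldl PySem.Set.add [] from rfl,
          pvFold_add, List.nil_append]
    rw [hded]
    calc pvFresh (PySem.Set.ofList pvPreferred) (rows.flatMap (fun row => row.map Prod.fst))
        = (pvFresh [] (rows.flatMap (fun row => row.map Prod.fst))).filter
            (fun k => !(List.contains (PySem.Set.ofList pvPreferred) k)) := by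
          refine (pvFresh_filter _ (PySem.Set.ofList pvPreferred) []
            (PySem.Set.ofList pvPreferred) ?_).symm
          intro x
          simp
      _ = (pvFresh [] (rows.flatMap (fun row => row.map Prod.fst))).filter
            (fun k => !(PySem.Set.contains (PySem.Set.ofList pvPreferred) k)) := rfl
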